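-- pv_equiv track=rewrite | github.com/dumehta23/323Final | compiler.py | normalize_spaces
-- ===== SOURCE A (Python) =====
-- def normalize_spaces(text):
--     lines = text.split('\n')
--     normalized_lines = []
--     for line in lines:
--         # Insert spaces around operators and parentheses
--         for operator in ['=', '+', '-', '*', '/', '(', ')', ';']:
--             line = line.replace(operator, f' {operator} ')
--
--         # Clean up extra spaces and standardize spacing
--         line = ' '.join(line.split())
--
--         # Specific replacement for "value = " inside the write function
--         line = line.replace('“value = ”,', '“value=” ,')
--
--         # Remove space between function name and opening parenthesis
--         line = line.replace('write (', 'write(')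
--
--         normalized_lines.append(line)
--
--     return '\n'.join(normalized_lines)
-- ===== SOURCE B (Python) =====
-- def normalize_spaces(text):
--     ops = '=+-*/();'
--     out = []
--     for line in text.split('\n'):
--         padded = ''.join(' ' + ch + ' ' if ch in ops else ch for ch in line)
--         line = ' '.join(padded.split())
--         line = line.replace('“value = ”,', '“value=” ,')
--         line = line.replace('write (', 'write(')
--         out.append(line)
--     return '\n'.join(out)
-- ===== Notes on version B (the rewrite author's own statement) =====
-- stated objective: alternative
-- what changed: Each line is padded in a single left-to-right character scan (append ' '+ch+' ' when ch is one of the 8 operator characters) instead of A's eight sequential str.replace passes over the whole line; the whitespace collapse and the two final literal replaces are kept verbatim.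
import Mathlib
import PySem

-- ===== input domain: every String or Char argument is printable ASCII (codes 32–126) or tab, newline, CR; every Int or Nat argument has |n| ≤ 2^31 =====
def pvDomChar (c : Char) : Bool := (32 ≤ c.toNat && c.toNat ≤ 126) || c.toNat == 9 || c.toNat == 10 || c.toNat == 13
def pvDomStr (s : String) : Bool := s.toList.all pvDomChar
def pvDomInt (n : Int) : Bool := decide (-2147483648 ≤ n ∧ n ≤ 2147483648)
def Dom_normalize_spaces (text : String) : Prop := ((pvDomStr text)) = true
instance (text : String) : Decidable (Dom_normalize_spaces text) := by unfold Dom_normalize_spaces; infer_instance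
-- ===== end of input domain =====

-- B pads the eight operator characters in one left-to-right scan per line instead of A's
-- eight sequential str.replace passes (objective: alternative; same collapse and final replaces).


-- ===== PORT A =====
-- per-line body of A's loop: 8 sequential replaces, whitespace collapse, two literal replaces
def pvLineA (line : String) : String :=
  let l1 := ["=", "+", "-", "*", "/", "(", ")", ";"].foldl
    (fun l op => PySem.Str.replace l op (" " ++ op ++ " ")) line
  let l2 := PySem.Str.join " " (PySem.Str.split₀ l1)
  let l3 := PySem.Str.replace l2 "“value = ”," "“value=” ,"
  PySem.Str.replace l3 "write (" "write("

def normalize_spaces (text : String) : String :=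
  let lines := (PySem.Str.split? text "\n").getD []
  let normalized_lines := lines.foldl (fun acc line => acc ++ [pvLineA line]) []
  PySem.Str.join "\n" normalized_lines

-- ===== PORT B =====
-- pad one character: ' ' + ch + ' ' if ch in '=+-*/();' else ch
def pvPadB (c : Char) : List Char :=
  if c ∈ ['=', '+', '-', '*', '/', '(', ')', ';'] then [' ', c, ' '] else [c]

-- per-line body of B's loop: single-scan padding, whitespace collapse, two literal replaces
def pvLineB (line : String) : String :=
  let padded := String.ofList (line.toList.flatMap pvPadB)
  let l2 := PySem.Str.join " " (PySem.Str.split₀ padded)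
  let l3 := PySem.Str.replace l2 "“value = ”," "“value=” ,"
  PySem.Str.replace l3 "write (" "write("

def normalize_spaces_alt (text : String) : String :=
  PySem.Str.join "\n" (((PySem.Str.split? text "\n").getD []).map pvLineB)

-- ===== PRECONDITION & SPEC =====
def Spec_normalize_spaces (text : String) (out : String) : Prop := out = normalize_spaces_alt text
instance (text : String) (out : String) : Decidable (Spec_normalize_spaces text out) := by unfold Spec_normalize_spaces; infer_instance

-- ===== CLAIM (what is proved, stated in full; the proofs are below) =====
def Claim_equal_normalize_spaces : Prop := ∀ (text : String), Dom_normalize_spaces text → Spec_normalize_spaces text (normalize_spaces text)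

-- ===== LEMMAS AND PROOFS =====

-- one str.replace with a single-character pattern is a character-wise expansion
theorem replace_single_go (o : Char) (new : List Char) :
    ∀ (l : List Char) (fuel : Nat) (acc : List Char), l.length ≤ fuel →
      PySem.Chars.replace.go [o] new fuel l acc
        = acc.reverse ++ l.flatMap (fun c => if c = o then new else [c]) := by
  intro l
  induction l with
  | nil =>
    intro fuel acc _
    cases fuel <;> simp [PySem.Chars.replace.go]
  | cons c t ih =>
    intro fuel acc hf
    cases fuel with
    | zero => simp at hf
    | succ fuel =>
      simp only [PySem.Chars.replace.go]
      by_cases h : c = o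
      · subst h
        have hp : List.isPrefixOf [c] (c :: t) = true := by simp [List.isPrefixOf]
        rw [if_pos hp]
        rw [show List.drop (List.length [c]) (c :: t) = t from rfl]
        simp only [List.length_cons] at hf
        rw [ih fuel _ (by omega)]
        simp
      · have hp : List.isPrefixOf [o] (c :: t) = false := by
          simp [List.isPrefixOf]; exact fun hh => absurd hh.symm h
        rw [if_neg (by simp [hp])]
        simp only [List.length_cons] at hf
        rw [ih fuel _ (by omega)]
        simp [h]

theorem replace_single (cs : List Char) (o : Char) (new : List Char) :
    PySem.Chars.replace cs [o] new = cs.flatMap (fun c => if c = o then new else [c]) := by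
  rw [PySem.Chars.replace]
  simp only [List.isEmpty_cons, if_false, Bool.false_eq_true]
  rw [replace_single_go o new cs cs.length [] (le_refl _)]
  simp

-- the composition of the 8 single-character pads equals B's pad (pointwise)
def pvPad1 (o : Char) (c : Char) : List Char := if c = o then [' ', o, ' '] else [c]

theorem pad_comp (c : Char) :
    List.flatMap (fun x1 =>
      List.flatMap (fun x2 =>
        List.flatMap (fun x3 =>
          List.flatMap (fun x4 =>
            List.flatMap (fun x5 =>
              List.flatMap (fun x6 =>
                List.flatMap (pvPad1 ';') (pvPad1 ')' x6)) (pvPad1 '(' x5))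
              (pvPad1 '/' x4)) (pvPad1 '*' x3)) (pvPad1 '-' x2)) (pvPad1 '+' x1))
      (pvPad1 '=' c) = pvPadB c := by
  by_cases h1 : c = '='; · subst h1; decide
  by_cases h2 : c = '+'; · subst h2; decide
  by_cases h3 : c = '-'; · subst h3; decide
  by_cases h4 : c = '*'; · subst h4; decide
  by_cases h5 : c = '/'; · subst h5; decide
  by_cases h6 : c = '('; · subst h6; decide
  by_cases h7 : c = ')'; · subst h7; decide
  by_cases h8 : c = ';'; · subst h8; decide
  simp [pvPad1, pvPadB, h1, h2, h3, h4, h5, h6, h7, h8]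

set_option maxHeartbeats 1000000 in
theorem pad_key (line : String) :
    ["=", "+", "-", "*", "/", "(", ")", ";"].foldl
      (fun l op => PySem.Str.replace l op (" " ++ op ++ " ")) line
      = String.ofList (line.toList.flatMap pvPadB) := by
  simp only [List.foldl]
  simp only [PySem.Str.replace, String.toList_ofList]
  refine congrArg String.ofList ?_
  have h1 : ("=" : String).toList = ['='] := rfl
  have h2 : ("+" : String).toList = ['+'] := rfl
  have h3 : ("-" : String).toList = ['-'] := rfl
  have h4 : ("*" : String).toList = ['*'] := rfl
  have h5 : ("/" : String).toList = ['/'] := rfl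
  have h6 : ("(" : String).toList = ['('] := rfl
  have h7 : (")" : String).toList = [')'] := rfl
  have h8 : (";" : String).toList = [';'] := rfl
  have hn : ∀ o : String, (" " ++ o ++ " ").toList = ' ' :: o.toList ++ [' '] := by
    intro o; simp
  rw [hn, hn, hn, hn, hn, hn, hn, hn, h1, h2, h3, h4, h5, h6, h7, h8]
  rw [replace_single, replace_single, replace_single, replace_single,
      replace_single, replace_single, replace_single, replace_single]
  rw [List.flatMap_assoc, List.flatMap_assoc, List.flatMap_assoc, List.flatMap_assoc,
      List.flatMap_assoc, List.flatMap_assoc, List.flatMap_assoc]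
  apply List.flatMap_congr
  intro c _
  exact pad_comp c

theorem foldl_append_map {α β : Type} (f : α → β) :
    ∀ (l : List α) (acc : List β),
      l.foldl (fun a x => a ++ [f x]) acc = acc ++ l.map f
  | [], acc => by simp
  | x :: t, acc => by
      simp only [List.foldl, List.map, foldl_append_map f t, List.append_assoc,
        List.singleton_append]

theorem lineA_eq_lineB (line : String) : pvLineA line = pvLineB line := by
  simp only [pvLineA, pvLineB, pad_key]

-- ===== VERDICT (by name: the statement is the Claim_ definition above) =====
theorem normalize_spaces_spec : Claim_equal_normalize_spaces := by
  intro text _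
  unfold Spec_normalize_spaces
  simp only [normalize_spaces, normalize_spaces_alt, foldl_append_map,
    List.nil_append, lineA_eq_lineB]
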